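-- pv_equiv track=rewrite | github.com/miliar/Code_Jam_Webscraper | solutions_python/solutions_year15_round0_nr1/3590.py | friends_needed
-- ===== SOURCE A (Python) =====
-- def friends_needed(aud):
--
--     stoodup = 0;
--     needed = 0;
--
--     for i in range(len(aud)):
--
--         if i > stoodup and aud[i] != 0:
--             diff = (i-stoodup)
--             stoodup = stoodup + diff + aud[i]
--             needed = needed + diff
--             continue;
--
--         stoodup = stoodup + aud[i];
--
--     return needed
-- ===== SOURCE B (Python) =====
-- def friends_needed(aud):
--     prefix = 0
--     best = 0
--     for i, a in enumerate(aud):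
--         if a != 0:
--             best = max(best, i - prefix)
--         prefix += a
--     return best
-- ===== Notes on version B (the rewrite author's own statement) =====
-- stated objective: alternative
-- what changed: B replaces A's combined standing counter (audience plus invited friends, with the invite folded back into the counter each step) by a prefix sum of the audience alone and a running maximum of the shortfall i - prefix over nonzero levels.
import Mathlib
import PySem

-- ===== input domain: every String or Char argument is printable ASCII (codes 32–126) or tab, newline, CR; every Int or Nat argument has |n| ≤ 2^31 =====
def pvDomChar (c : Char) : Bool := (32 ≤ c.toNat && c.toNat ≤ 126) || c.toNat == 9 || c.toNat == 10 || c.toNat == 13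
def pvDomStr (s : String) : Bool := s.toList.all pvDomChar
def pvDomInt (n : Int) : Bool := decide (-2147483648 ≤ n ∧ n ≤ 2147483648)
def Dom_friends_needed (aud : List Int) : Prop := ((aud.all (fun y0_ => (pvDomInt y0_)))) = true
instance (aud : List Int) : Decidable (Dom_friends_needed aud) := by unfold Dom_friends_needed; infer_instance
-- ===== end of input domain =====

-- B replaces A's combined standing counter (audience + invited friends) by a prefix sum of the
-- audience alone and a running maximum shortfall: same value, a different decomposition.

-- ===== PORT A =====
def friends_needed (aud : List Int) : Int :=
  ((PySem.List.pyRange 0 (aud.length : Int) 1).foldl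
    (fun (st : Int × Int) i =>
      -- st = (stoodup, needed); aud[i]: i from range(len(aud)) is always in range, pyGetD is exact here
      let ai := PySem.List.pyGetD aud i 0
      if i > st.1 ∧ ai ≠ 0 then
        let diff := i - st.1
        (st.1 + diff + ai, st.2 + diff)
      else
        (st.1 + ai, st.2))
    (0, 0)).2

-- ===== PORT B =====
def friends_needed_alt (aud : List Int) : Int :=
  ((PySem.List.enumerate aud 0).foldl
    (fun (st : Int × Int) p =>
      -- st = (prefix, best)
      (st.1 + p.2, if p.2 ≠ 0 then max st.2 (p.1 - st.1) else st.2))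
    (0, 0)).2

-- ===== PRECONDITION & SPEC =====
def Spec_friends_needed (aud : List Int) (out : Int) : Prop := out = friends_needed_alt aud
instance (aud : List Int) (out : Int) : Decidable (Spec_friends_needed aud out) := by unfold Spec_friends_needed; infer_instance

-- ===== CLAIM (what is proved, stated in full; the proofs are below) =====
def Claim_equal_friends_needed : Prop := ∀ (aud : List Int), Dom_friends_needed aud → Spec_friends_needed aud (friends_needed aud)

-- ===== LEMMAS AND PROOFS =====

/-- Invariant: A's stoodup = B's prefix + best, A's needed = B's best; the second components of
the two folds agree from any such pair of states, over any list of pairs. -/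
lemma loop_eq (l : List (Int × Int)) : ∀ (pre best : Int),
    (l.foldl
      (fun (st : Int × Int) p =>
        let ai := p.2
        if p.1 > st.1 ∧ ai ≠ 0 then
          let diff := p.1 - st.1
          (st.1 + diff + ai, st.2 + diff)
        else (st.1 + ai, st.2))
      (pre + best, best)).2
  = (l.foldl
      (fun (st : Int × Int) p =>
        (st.1 + p.2, if p.2 ≠ 0 then max st.2 (p.1 - st.1) else st.2))
      (pre, best)).2 := by
  induction l with
  | nil => intro pre best; rfl
  | cons p l ih =>
    intro pre best
    simp only [List.foldl_cons]
    by_cases hz : p.2 = 0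
    · convert ih (pre + p.2) best using 3 <;> simp [hz]
    · by_cases hgt : p.1 > pre + best
      · convert ih (pre + p.2) (p.1 - pre) using 3 <;>
          simp [Prod.ext_iff, hz, hgt] <;> omega
      · convert ih (pre + p.2) best using 3 <;>
          simp [Prod.ext_iff, hz, hgt] <;> omega

-- ===== VERDICT (by name: the statement is the Claim_ definition above) =====
theorem friends_needed_spec : Claim_equal_friends_needed := by
  intro aud _
  unfold Spec_friends_needed friends_needed friends_needed_alt
  rw [PySem.List.enumerate_eq_map_pyRange (d := 0), List.foldl_map]
  have := loop_eq ((PySem.List.pyRange 0 (aud.length : Int) 1).map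
      (fun j => (j, PySem.List.pyGetD aud j 0))) 0 0
  simp only [List.foldl_map] at this
  simpa using this
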